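-- pv_equiv track=rewrite | github.com/azirella-ltd/Autonomy-TMS | backend/app/services/hierarchical_metrics_service.py | _fill_nones
-- ===== SOURCE A (Python) =====
-- def _fill_nones(arr: list) -> list:
--     """Forward-fill None values, then back-fill remaining."""
--     result = list(arr)
--     # Forward fill
--     for i in range(1, len(result)):
--         if result[i] is None and result[i - 1] is not None:
--             result[i] = result[i - 1]
--     # Backward fill
--     for i in range(len(result) - 2, -1, -1):
--         if result[i] is None and result[i + 1] is not None:
--             result[i] = result[i + 1]
--     # If all None, return empty
--     if all(v is None for v in result):
--         return []
--     return [v if v is not None else 0 for v in result]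
-- ===== SOURCE B (Python) =====
-- def _fill_nones(arr: list) -> list:
--     last = None
--     for v in arr:
--         if v is not None:
--             last = v
--             break
--     if last is None:
--         return []
--     out = []
--     for v in arr:
--         if v is not None:
--             last = v
--         out.append(last)
--     return out
-- ===== Notes on version B (the rewrite author's own statement) =====
-- stated objective: simpler
-- what changed: Replaces A's list copy, forward index pass, backward index pass, all-None check and final comprehension by a single forward pass seeded with the first non-None value (found by one initial scan), returning an empty list when no such value exists.
import Mathlib
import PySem

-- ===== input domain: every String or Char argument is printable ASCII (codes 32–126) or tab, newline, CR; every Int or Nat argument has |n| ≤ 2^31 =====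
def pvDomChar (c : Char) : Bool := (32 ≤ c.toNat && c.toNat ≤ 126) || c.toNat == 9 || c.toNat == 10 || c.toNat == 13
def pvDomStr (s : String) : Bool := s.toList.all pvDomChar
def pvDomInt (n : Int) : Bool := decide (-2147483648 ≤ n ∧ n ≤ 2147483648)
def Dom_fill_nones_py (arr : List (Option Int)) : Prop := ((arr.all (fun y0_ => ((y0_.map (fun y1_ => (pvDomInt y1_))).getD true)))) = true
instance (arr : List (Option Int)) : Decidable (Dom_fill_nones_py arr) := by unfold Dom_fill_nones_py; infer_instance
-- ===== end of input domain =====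

-- B replaces A's forward pass + backward pass + all-None check + final comprehension by one
-- forward pass seeded with the first non-None value (objective: simpler, one traversal instead of five).

-- ===== PORT A =====
-- result[i] = result[i-1] if result[i] is None and result[i-1] is not None
def fwdStep (r : List (Option Int)) (i : Int) : List (Option Int) :=
  if PySem.List.pyGetD r i none = none ∧ PySem.List.pyGetD r (i - 1) none ≠ none then
    PySem.List.pySetD r i (PySem.List.pyGetD r (i - 1) none)
  else r

-- result[i] = result[i+1] if result[i] is None and result[i+1] is not None
def bwdStep (r : List (Option Int)) (i : Int) : List (Option Int) :=
  if PySem.List.pyGetD r i none = none ∧ PySem.List.pyGetD r (i + 1) none ≠ none then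
    PySem.List.pySetD r i (PySem.List.pyGetD r (i + 1) none)
  else r

def fill_nones_py (arr : List (Option Int)) : List Int :=
  let result := arr
  let result := (PySem.List.pyRange 1 result.length 1).foldl fwdStep result
  let result := (PySem.List.pyRange ((result.length : Int) - 2) (-1) (-1)).foldl bwdStep result
  if result.all (fun v => v == none) then []
  else result.map (fun v => match v with | some x => x | none => 0)

-- ===== PORT B =====
-- first loop of Source B: scan for the first non-None value (break = stop)
def findFirst : List (Option Int) → Option Int
  | [] => none
  | some v :: _ => some v
  | none :: t => findFirst t

-- second loop of Source B: one forward pass appending the running last value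
def fillFrom (last : Int) : List (Option Int) → List Int
  | [] => []
  | some v :: t => v :: fillFrom v t
  | none :: t => last :: fillFrom last t

def fill_nones_py_alt (arr : List (Option Int)) : List Int :=
  match findFirst arr with
  | none => []
  | some v => fillFrom v arr

-- ===== PRECONDITION & SPEC =====
def Spec_fill_nones_py (arr : List (Option Int)) (out : List Int) : Prop := out = fill_nones_py_alt arr
instance (arr : List (Option Int)) (out : List Int) : Decidable (Spec_fill_nones_py arr out) := by unfold Spec_fill_nones_py; infer_instance

-- ===== CLAIM (what is proved, stated in full; the proofs are below) =====
def Claim_equal_fill_nones_py : Prop := ∀ (arr : List (Option Int)), Dom_fill_nones_py arr → Spec_fill_nones_py arr (fill_nones_py arr)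

-- ===== LEMMAS AND PROOFS =====

-- reference forward fill: each element replaced by the running last value (seed = value before the list)
def ffill (last : Option Int) : List (Option Int) → List (Option Int)
  | [] => []
  | x :: t => (x.or last) :: ffill (x.or last) t

-- the running last value after one pass of fillFrom
def carry (l : Int) : List (Option Int) → Int
  | [] => l
  | some v :: t => carry v t
  | none :: t => carry l t

theorem getD_append_length {α : Type} (pre t : List α) (x d : α) :
    (pre ++ x :: t).getD pre.length d = x := by
  induction pre with
  | nil => rfl
  | cons p ps ih => simpa using ih

theorem getD_append_length_succ {α : Type} (pre t : List α) (x y d : α) :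
    (pre ++ x :: y :: t).getD (pre.length + 1) d = y := by
  induction pre with
  | nil => rfl
  | cons p ps ih => simpa using ih

theorem set_append_length {α : Type} (pre t : List α) (x v : α) :
    (pre ++ x :: t).set pre.length v = pre ++ v :: t := by
  induction pre with
  | nil => rfl
  | cons p ps ih => simp [ih]

theorem getD_last_of {α : Type} (pre : List α) (g : α) (hg : pre.getLast? = some g)
    (x : α) (t : List α) (d : α) : (pre ++ x :: t).getD (pre.length - 1) d = g := by
  induction pre generalizing g with
  | nil => simp at hg
  | cons p ps ih =>
    cases ps with
    | nil =>
      simp at hg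
      subst hg
      rfl
    | cons q qs =>
      have hg' : (q :: qs).getLast? = some g := by rwa [List.getLast?_cons_cons] at hg
      have h2 := ih g hg'
      simp only [List.length_cons, Nat.add_sub_cancel] at h2 ⊢
      simpa [List.getD_cons_succ] using h2

theorem fwd_gen (cur : List (Option Int)) : ∀ (pre : List (Option Int)) (g : Option Int),
    pre.getLast? = some g →
    (PySem.List.pyRange (pre.length : Int) ((pre.length : Int) + (cur.length : Int)) 1).foldl
      fwdStep (pre ++ cur) = pre ++ ffill g cur := by
  induction cur with
  | nil =>
    intro pre g _
    rw [show PySem.List.pyRange (pre.length : Int)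
        ((pre.length : Int) + ((([] : List (Option Int))).length : Int)) 1 = []
      from PySem.List.pyRange_one_eq_nil (by simp)]
    simp [ffill]
  | cons x t ih =>
    intro pre g hg
    have hpre : pre ≠ [] := by intro hn; rw [hn] at hg; simp at hg
    have h0 : 0 < pre.length := List.length_pos_iff.mpr hpre
    rw [show PySem.List.pyRange (pre.length : Int) ((pre.length : Int) + (((x :: t) : List (Option Int)).length : Int)) 1
        = (pre.length : Int) :: PySem.List.pyRange ((pre.length : Int) + 1) ((pre.length : Int) + (((x :: t) : List (Option Int)).length : Int)) 1
      from PySem.List.pyRange_one_cons (by simp only [List.length_cons]; push_cast; omega)]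
    have hget : PySem.List.pyGetD (pre ++ x :: t) (pre.length : Int) none = x := by
      simpa using getD_append_length pre t x none
    have hprev : PySem.List.pyGetD (pre ++ x :: t) ((pre.length : Int) - 1) none = g := by
      rw [show ((pre.length : Int) - 1) = ((pre.length - 1 : Nat) : Int) by omega,
        PySem.List.pyGetD_natCast]
      exact getD_last_of pre g hg x t none
    have hstep : fwdStep (pre ++ x :: t) (pre.length : Int) = pre ++ (x.or g) :: t := by
      unfold fwdStep
      rw [hget, hprev]
      rcases x with _ | w
      · rcases g with _ | u
        · simp [Option.or]
        · rw [if_pos (by simp)]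
          simp only [PySem.List.pySetD_natCast]
          rw [set_append_length]
          simp [Option.or]
      · rw [if_neg (by simp)]
        simp [Option.or]
    rw [List.foldl_cons, hstep]
    have hglast : (pre ++ [x.or g]).getLast? = some (x.or g) := by simp
    have ihh := ih (pre ++ [x.or g]) (x.or g) hglast
    have e1 : ((pre.length : Int) + 1) = (((pre ++ [x.or g]).length : Nat) : Int) := by
      simp only [List.length_append, List.length_cons, List.length_nil]; push_cast; omega
    have e2 : ((pre.length : Int) + (((x :: t) : List (Option Int)).length : Int))
        = (((pre ++ [x.or g]).length : Nat) : Int) + (t.length : Int) := by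
      simp only [List.length_append, List.length_cons, List.length_nil]; push_cast; omega
    rw [show pre ++ (x.or g) :: t = (pre ++ [x.or g]) ++ t by simp]
    rw [e1, e2, ihh]
    simp [ffill]

theorem bwd_gen (rc : List (Option Int)) : ∀ (s0 : Option Int) (st : List (Option Int)),
    (PySem.List.pyRange ((rc.length : Int) - 1) (-1) (-1)).foldl
      bwdStep (rc.reverse ++ s0 :: st) = (ffill s0 rc).reverse ++ s0 :: st := by
  induction rc with
  | nil =>
    intro s0 st
    rw [show ((([] : List (Option Int))).length : Int) - 1 = (-1 : Int) by simp]
    rw [PySem.List.pyRange_neg_one_eq_nil (le_refl _)]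
    simp [ffill]
  | cons x rt ih =>
    intro s0 st
    rw [show (((x :: rt) : List (Option Int)).length : Int) - 1 = (rt.length : Int) by
      rw [List.length_cons]; push_cast; ring]
    rw [show PySem.List.pyRange ((rt.length : Int)) (-1) (-1)
        = (rt.length : Int) :: PySem.List.pyRange ((rt.length : Int) - 1) (-1) (-1)
      from PySem.List.pyRange_neg_one_cons (by omega)]
    have hsplit : (x :: rt).reverse ++ s0 :: st = rt.reverse ++ x :: s0 :: st := by simp
    rw [hsplit, List.foldl_cons]
    have hget : PySem.List.pyGetD (rt.reverse ++ x :: s0 :: st) (rt.length : Int) none = x := by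
      have h1 := getD_append_length rt.reverse (s0 :: st) x none
      simp only [List.length_reverse] at h1
      simpa using h1
    have hnext : PySem.List.pyGetD (rt.reverse ++ x :: s0 :: st) ((rt.length : Int) + 1) none
        = s0 := by
      rw [show ((rt.length : Int) + 1) = ((rt.length + 1 : Nat) : Int) by push_cast; ring,
        PySem.List.pyGetD_natCast]
      have h1 := getD_append_length_succ rt.reverse st x s0 none
      simpa only [List.length_reverse] using h1
    have hstep : bwdStep (rt.reverse ++ x :: s0 :: st) (rt.length : Int)
        = rt.reverse ++ (x.or s0) :: s0 :: st := by
      unfold bwdStep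
      rw [hget, hnext]
      rcases x with _ | w
      · rcases s0 with _ | u
        · simp [Option.or]
        · rw [if_pos (by simp)]
          simp only [PySem.List.pySetD_natCast]
          have h1 := set_append_length rt.reverse ((some u) :: st) (none : Option Int) (some u)
          simp only [List.length_reverse] at h1
          rw [h1]
          simp [Option.or]
      · rw [if_neg (by simp)]
        simp [Option.or]
    rw [hstep]
    have ihh := ih (x.or s0) (s0 :: st)
    rw [show rt.reverse ++ (x.or s0) :: s0 :: st = rt.reverse ++ ((x.or s0) :: (s0 :: st)) from rfl]
    rw [ihh]
    simp [ffill]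

theorem fwd_full (arr : List (Option Int)) :
    (PySem.List.pyRange 1 (arr.length : Int) 1).foldl fwdStep arr = ffill none arr := by
  cases arr with
  | nil =>
    rw [show ((([] : List (Option Int))).length : Int) = (0 : Int) by simp]
    rw [PySem.List.pyRange_one_eq_nil (by norm_num)]
    rfl
  | cons a t =>
    have hl : (((a :: t) : List (Option Int)).length : Int) = 1 + (t.length : Int) := by
      rw [List.length_cons]; push_cast; ring
    rw [hl]
    have hgen := fwd_gen t [a] a (by simp)
    simp only [List.length_cons, List.length_nil, Nat.zero_add, Nat.cast_one,
      List.singleton_append] at hgen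
    rw [hgen]
    cases a <;> simp [ffill, Option.or]

theorem bwd_full (xs : List (Option Int)) :
    (PySem.List.pyRange ((xs.length : Int) - 2) (-1) (-1)).foldl bwdStep xs
      = (ffill none xs.reverse).reverse := by
  rcases List.eq_nil_or_concat xs with hnil | ⟨init, l, rfl⟩
  · subst hnil
    rw [show ((([] : List (Option Int))).length : Int) - 2 = (-2 : Int) by simp]
    rw [PySem.List.pyRange_neg_one_eq_nil (by norm_num)]
    rfl
  · simp only [List.concat_eq_append]
    have hlen : ((init ++ [l]).length : Int) - 2 = ((init.reverse.length : Int)) - 1 := by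
      simp only [List.length_append, List.length_cons, List.length_nil, List.length_reverse]
      push_cast; omega
    rw [hlen]
    rw [show init ++ [l] = init.reverse.reverse ++ l :: [] by simp]
    rw [bwd_gen init.reverse l []]
    rw [show (init.reverse.reverse ++ l :: []).reverse = l :: init.reverse by simp]
    cases l <;> simp [ffill, Option.or]

-- characterizations of B's helpers
theorem ffill_seed (v : Int) (xs : List (Option Int)) :
    ffill (some v) xs = (fillFrom v xs).map some := by
  induction xs generalizing v with
  | nil => rfl
  | cons x t ih => cases x <;> simp [ffill, fillFrom, Option.or, ih]

theorem ffill_allnone (xs : List (Option Int)) (hx : ∀ x ∈ xs, x = none) :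
    ffill none xs = xs := by
  induction xs with
  | nil => rfl
  | cons x t ih =>
    have hxn : x = none := hx x (by simp)
    subst hxn
    simp [ffill, Option.or, ih (fun y hy => hx y (by simp [hy]))]

theorem ffill_none_append_allnone (N l : List (Option Int)) (hN : ∀ x ∈ N, x = none) :
    ffill none (N ++ l) = N ++ ffill none l := by
  induction N with
  | nil => rfl
  | cons x t ih =>
    have hxn : x = none := hN x (by simp)
    subst hxn
    simp [ffill, Option.or, ih (fun y hy => hN y (by simp [hy]))]

theorem findFirst_none (arr : List (Option Int)) :
    findFirst arr = none ↔ ∀ x ∈ arr, x = none := by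
  induction arr with
  | nil => simp [findFirst]
  | cons x t ih =>
    cases x with
    | none => simpa [findFirst] using ih
    | some v => simp [findFirst]

theorem findFirst_split (arr : List (Option Int)) (v : Int) (h : findFirst arr = some v) :
    ∃ N rest, arr = N ++ some v :: rest ∧ ∀ x ∈ N, x = none := by
  induction arr with
  | nil => simp [findFirst] at h
  | cons x t ih =>
    cases x with
    | some w =>
      simp [findFirst] at h
      exact ⟨[], t, by simp [h], by simp⟩
    | none =>
      obtain ⟨N, rest, hsp, hN⟩ := ih (by simpa [findFirst] using h)
      refine ⟨none :: N, rest, by simp [hsp], fun y hy => ?_⟩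
      rcases List.mem_cons.mp hy with rfl | h2
      · rfl
      · exact hN y h2

theorem fillFrom_append (m : List (Option Int)) : ∀ (l : Int) (r : List (Option Int)),
    fillFrom l (m ++ r) = fillFrom l m ++ fillFrom (carry l m) r := by
  induction m with
  | nil => intro l r; rfl
  | cons x t ih => intro l r; cases x <;> simp [fillFrom, carry, ih]

theorem fillFrom_map_some (xs : List Int) : ∀ (l : Int), fillFrom l (xs.map some) = xs := by
  induction xs with
  | nil => intro l; rfl
  | cons x t ih => intro l; simp [fillFrom, ih]

theorem fillFrom_allnone (l : Int) (N : List (Option Int)) (hN : ∀ x ∈ N, x = none) :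
    fillFrom l N = List.replicate N.length l := by
  induction N with
  | nil => rfl
  | cons x t ih =>
    have hxn : x = none := hN x (by simp)
    subst hxn
    simp [fillFrom, List.replicate, ih (fun y hy => hN y (by simp [hy]))]

theorem carry_allnone (l : Int) (N : List (Option Int)) (hN : ∀ x ∈ N, x = none) :
    carry l N = l := by
  induction N with
  | nil => rfl
  | cons x t ih =>
    have hxn : x = none := hN x (by simp)
    subst hxn
    simp [carry, ih (fun y hy => hN y (by simp [hy]))]

theorem carry_map_some (xs : List Int) : ∀ (l : Int), carry l (xs.map some) = xs.getLastD l := by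
  induction xs with
  | nil => intro l; rfl
  | cons x t ih =>
    intro l
    rw [List.map_cons, show carry l (some x :: t.map some) = carry x (t.map some) from rfl,
      ih x, List.getLastD_cons]

theorem getLastD_append_singleton {α : Type} (xs : List α) (a : α) :
    ∀ (d : α), (xs ++ [a]).getLastD d = a := by
  induction xs with
  | nil => intro d; rfl
  | cons p ps ih =>
    intro d
    rw [List.cons_append, List.getLastD_cons]
    exact ih p

-- the composition of the two passes, positive case
theorem both_passes (arr : List (Option Int)) (v : Int) (h : findFirst arr = some v) :
    (ffill none (ffill none arr).reverse).reverse = (fillFrom v arr).map some := by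
  obtain ⟨N, rest, rfl, hN⟩ := findFirst_split arr v h
  have hff : ffill none (N ++ some v :: rest) = N ++ (v :: fillFrom v rest).map some := by
    rw [ffill_none_append_allnone N _ hN]
    rw [show ffill none (some v :: rest) = (some v) :: ffill (some v) rest by
      simp [ffill, Option.or]]
    rw [ffill_seed]
    simp
  rw [hff]
  rw [show (N ++ (v :: fillFrom v rest).map some).reverse
      = ((v :: fillFrom v rest).reverse).map some ++ N.reverse by simp]
  obtain ⟨s0, st, hs⟩ : ∃ s0 st, (v :: fillFrom v rest).reverse = s0 :: st := by
    cases hh : (v :: fillFrom v rest).reverse with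
    | nil => exact absurd hh (by simp)
    | cons a b => exact ⟨a, b, rfl⟩
  rw [hs]
  have hb : ffill none ((s0 :: st).map some ++ N.reverse)
      = (s0 :: (st ++ List.replicate N.length (st.getLastD s0))).map some := by
    simp only [List.map_cons, List.cons_append]
    rw [show ffill none (some s0 :: (st.map some ++ N.reverse))
        = some s0 :: ffill (some s0) (st.map some ++ N.reverse) by simp [ffill, Option.or]]
    rw [ffill_seed, fillFrom_append, fillFrom_map_some, carry_map_some,
      fillFrom_allnone _ _ (fun y hy => hN y (by simpa using hy))]
    simp
  rw [hb]
  have hlast : st.getLastD s0 = v := by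
    have h1 : (s0 :: st).getLastD v = st.getLastD s0 := by rw [List.getLastD_cons]
    rw [← h1, ← hs, List.reverse_cons, getLastD_append_singleton]
  rw [hlast]
  rw [← List.map_reverse]
  congr 1
  have hr : fillFrom v (N ++ some v :: rest)
      = List.replicate N.length v ++ (v :: fillFrom v rest) := by
    rw [fillFrom_append, fillFrom_allnone _ _ hN, carry_allnone _ _ hN]
    rfl
  rw [hr]
  rw [show (s0 :: (st ++ List.replicate N.length v)) = (s0 :: st) ++ List.replicate N.length v
    by simp]
  rw [List.reverse_append, ← hs, List.reverse_reverse, List.reverse_replicate]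

theorem fill_nones_py_eq (arr : List (Option Int)) :
    fill_nones_py arr = fill_nones_py_alt arr := by
  simp only [fill_nones_py]
  rw [fwd_full arr, bwd_full (ffill none arr)]
  cases hf : findFirst arr with
  | none =>
    have hall : ∀ x ∈ arr, x = none := (findFirst_none arr).mp hf
    rw [ffill_allnone arr hall,
      ffill_allnone arr.reverse (fun x hx => hall x (by simpa using hx)),
      List.reverse_reverse]
    rw [if_pos (by
      simp only [List.all_eq_true]
      intro x hx
      simp [hall x hx])]
    simp [fill_nones_py_alt, hf]
  | some v =>
    rw [both_passes arr v hf]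
    have hne : ((fillFrom v arr).map some).all (fun w => w == none) = false := by
      rcases arr with _ | ⟨a, t⟩
      · simp [findFirst] at hf
      · cases a <;> rfl
    rw [if_neg (by simp only [hne]; decide)]
    rw [show fill_nones_py_alt arr = fillFrom v arr by simp [fill_nones_py_alt, hf]]
    generalize fillFrom v arr = L
    induction L with
    | nil => rfl
    | cons a t ih => simpa using ih

-- ===== VERDICT (by name: the statement is the Claim_ definition above) =====
theorem fill_nones_py_spec : Claim_equal_fill_nones_py := by
  intro arr _
  unfold Spec_fill_nones_py
  exact fill_nones_py_eq arr
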